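-- pv_equiv track=rewrite | github.com/Rven721/my_crm | smeta/busines_logic/logic.py | get_worker_task_load
-- ===== SOURCE A (Python) =====
-- def get_worker_task_load(events: tuple, workers: tuple) -> dict:
--     """Will return a dict with tasks for each worker in list"""
--     workers_load = {}
--     for worker_num in dict(enumerate(workers, 1)):
--         worker_events = []
--         for event_num, event_data in enumerate(events, 1):
--             if worker_num in event_data[1]:
--                 worker_events.append(event_num)
--         workers_load[worker_num] = [worker_events]
--     return workers_load
-- ===== SOURCE B (Python) =====
-- def get_worker_task_load(events: tuple, workers: tuple) -> dict:
--     """Will return a dict with tasks for each worker in list"""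
--     load = {i: [] for i in range(1, len(workers) + 1)}
--     for event_num, event_data in enumerate(events, 1):
--         for p in set(event_data[1]):
--             if p in load:
--                 load[p].append(event_num)
--     return {w: [evs] for w, evs in load.items()}
-- ===== Notes on version B (the rewrite author's own statement) =====
-- stated objective: faster
-- what changed: Instead of scanning every event once per worker index (nested W*E membership loop), B makes one pass over events and scatters each event number into the per-worker-index buckets of its distinct participants, after initialising buckets for indices 1..W.
import Mathlib
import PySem

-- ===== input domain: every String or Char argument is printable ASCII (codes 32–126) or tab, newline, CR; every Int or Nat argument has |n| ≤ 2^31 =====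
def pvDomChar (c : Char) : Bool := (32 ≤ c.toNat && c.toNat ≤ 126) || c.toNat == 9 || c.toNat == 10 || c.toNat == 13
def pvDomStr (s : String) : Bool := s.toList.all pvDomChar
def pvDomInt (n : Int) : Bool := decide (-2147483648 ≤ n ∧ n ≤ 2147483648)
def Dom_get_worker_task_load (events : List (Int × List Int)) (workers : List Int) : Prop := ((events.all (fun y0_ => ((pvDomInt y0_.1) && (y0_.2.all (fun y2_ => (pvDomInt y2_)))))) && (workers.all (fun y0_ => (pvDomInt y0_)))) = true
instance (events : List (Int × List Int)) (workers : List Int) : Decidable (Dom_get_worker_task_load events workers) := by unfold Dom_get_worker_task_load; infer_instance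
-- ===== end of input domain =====

-- B replaces A's per-worker scan of all events with one pass over the events
-- that scatters each event number into the buckets of its distinct participants (objective: faster).

-- ===== PORT A =====
-- A iterates 'for worker_num in dict(enumerate(workers, 1))': the keys of that dict are the
-- indices 1..len(workers) in order (they are pairwise distinct), i.e. the firsts of enumerate(workers, 1).
def get_worker_task_load (events : List (Int × List Int)) (workers : List Int) : List (Int × List (List Int)) :=
  let workers_load : PySem.Dict Int (List (List Int)) :=
    ((PySem.List.enumerate workers 1).map (·.1)).foldl (fun wl worker_num =>
      let worker_events : List Int :=
        (PySem.List.enumerate events 1).foldl (fun acc p =>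
          if p.2.2.contains worker_num then acc ++ [p.1] else acc) []
      wl.insert worker_num [worker_events]) PySem.Dict.empty
  workers_load.items

-- ===== PORT B =====
def get_worker_task_load_alt (events : List (Int × List Int)) (workers : List Int) : List (Int × List (List Int)) :=
  let load0 : PySem.Dict Int (List Int) :=
    (PySem.List.pyRange 1 ((workers.length : Int) + 1) 1).foldl (fun d i => d.insert i []) PySem.Dict.empty
  let load : PySem.Dict Int (List Int) :=
    (PySem.List.enumerate events 1).foldl (fun d p =>
      (PySem.Set.ofList p.2.2).foldl (fun d q =>
        if d.contains q then d.modify q [] (· ++ [p.1]) else d) d) load0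
  load.items.map (fun wv => (wv.1, [wv.2]))

-- ===== PRECONDITION & SPEC =====
def Spec_get_worker_task_load (events : List (Int × List Int)) (workers : List Int) (out : List (Int × List (List Int))) : Prop := out = get_worker_task_load_alt events workers
instance (events : List (Int × List Int)) (workers : List Int) (out : List (Int × List (List Int))) : Decidable (Spec_get_worker_task_load events workers out) := by unfold Spec_get_worker_task_load; infer_instance

-- ===== CLAIM (what is proved, stated in full; the proofs are below) =====
def Claim_equal_get_worker_task_load : Prop := ∀ (events : List (Int × List Int)) (workers : List Int), Dom_get_worker_task_load events workers → Spec_get_worker_task_load events workers (get_worker_task_load events workers)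

-- ===== LEMMAS AND PROOFS =====

-- find? over a keyed map hits the key's own value
theorem pv_find_map {α : Type} (R : List Int) (h : Int → α) (q : Int) (hq : q ∈ R) :
    List.find? (fun p => p.1 == q) (R.map (fun w => (w, h w))) = some (q, h q) := by
  induction R with
  | nil => cases hq
  | cons r R ih =>
    by_cases hrq : r = q
    · subst hrq
      rw [List.map_cons, List.find?_cons_of_pos (by simp)]
    · rw [List.map_cons, List.find?_cons_of_neg (by simp [hrq])]
      exact ih ((List.mem_cons.1 hq).resolve_left (fun e => hrq e.symm))

-- folding fresh-key inserts appends the pairs in order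
theorem pv_foldl_insert_fresh {α : Type} (R : List Int) (v : Int → α) (d : PySem.Dict Int α)
    (hnd : R.Nodup) (hfresh : ∀ w ∈ R, d.contains w = false) :
    (R.foldl (fun d w => d.insert w (v w)) d).items = d.items ++ R.map (fun w => (w, v w)) := by
  induction R generalizing d with
  | nil => simp
  | cons r R ih =>
    simp only [List.foldl_cons, List.map_cons]
    have hfr : d.contains r = false := hfresh r (List.mem_cons_self)
    have hins : (d.insert r (v r)).items = d.items ++ [(r, v r)] :=
      PySem.Dict.items_insert_of_not_contains d (v r) hfr
    rw [ih (d.insert r (v r)) (List.Nodup.of_cons hnd)]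
    · rw [hins]; simp
    · intro w hw
      have hwr : w ≠ r := by
        intro e; exact (List.nodup_cons.1 hnd).1 (e ▸ hw)
      have h1 : ∀ a b, (a, b) ∈ d.items → ¬ a = w := by
        have := hfresh w (List.mem_cons_of_mem _ hw)
        simpa [PySem.Dict.contains] using this
      simp [PySem.Dict.contains, hins]
      exact ⟨h1, fun e => hwr e.symm⟩

-- scattering one event number i over the distinct participants S of one event
theorem pv_scatter_one (S : List Int) (R : List Int) (h : Int → List Int) (i : Int)
    (hS : S.Nodup) :
    S.foldl (fun d q => if d.contains q then d.modify q [] (· ++ [i]) else d)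
        (PySem.Dict.mk (R.map (fun w => (w, h w)))) =
      PySem.Dict.mk (R.map (fun w => (w, if w ∈ S then h w ++ [i] else h w))) := by
  induction S generalizing h with
  | nil => simp
  | cons q S ih =>
    have hqS : q ∉ S := (List.nodup_cons.1 hS).1
    simp only [List.foldl_cons]
    have hcont : (PySem.Dict.mk (R.map (fun w => (w, h w)))).contains q = decide (q ∈ R) := by
      simp [PySem.Dict.contains, List.any_map, Function.comp_def, List.any_beq', List.contains_eq_mem]
    by_cases hqR : q ∈ R
    · rw [if_pos (by simp [hcont, hqR])]
      have hget : (PySem.Dict.mk (R.map (fun w => (w, h w)))).getD q [] = h q := by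
        simp [PySem.Dict.getD, PySem.Dict.get?, pv_find_map R h q hqR]
      have hmod : (PySem.Dict.mk (R.map (fun w => (w, h w)))).modify q [] (· ++ [i]) =
          PySem.Dict.mk (R.map (fun w => (w, if w = q then h w ++ [i] else h w))) := by
        simp only [PySem.Dict.modify, PySem.Dict.insert, hcont, hqR, decide_true, if_true, hget]
        congr 1
        simp only [List.map_map]
        refine List.map_congr_left (fun w _ => ?_)
        by_cases hwq : w = q
        · subst hwq; simp
        · simp [hwq, Function.comp]
      rw [hmod, ih _ (List.Nodup.of_cons hS)]
      congr 1
      refine List.map_congr_left (fun w _ => ?_)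
      by_cases hwq : w = q
      · subst hwq; simp [hqS]
      · simp [hwq, List.mem_cons]
    · rw [if_neg (by simp [hcont, hqR])]
      rw [ih _ (List.Nodup.of_cons hS)]
      congr 1
      refine List.map_congr_left (fun w hw => ?_)
      have hwq : w ≠ q := fun e => hqR (e ▸ hw)
      simp [List.mem_cons, hwq]

-- one pass over the (enumerated) events scatters each event number into its participants' buckets
theorem pv_scatter_all (L : List (Int × Int × List Int)) (R : List Int) (h : Int → List Int) :
    L.foldl (fun d p =>
        (PySem.Set.ofList p.2.2).foldl (fun d q =>
          if d.contains q then d.modify q [] (· ++ [p.1]) else d) d)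
        (PySem.Dict.mk (R.map (fun w => (w, h w)))) =
      PySem.Dict.mk (R.map (fun w =>
        (w, h w ++ (L.filter (fun p => p.2.2.contains w)).map (·.1)))) := by
  induction L generalizing h with
  | nil => simp
  | cons p L ih =>
    simp only [List.foldl_cons]
    rw [pv_scatter_one _ R h p.1 (PySem.Set.nodup_ofList _), ih]
    congr 1
    refine List.map_congr_left (fun w _ => ?_)
    have hmem : (w ∈ PySem.Set.ofList p.2.2) ↔ w ∈ p.2.2 := PySem.Set.mem_ofList _ _
    simp only [List.filter_cons]
    by_cases hc : w ∈ p.2.2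
    · simp [hmem, hc, List.append_assoc]
    · simp [hmem, hc]

-- ===== VERDICT (by name: the statement is the Claim_ definition above) =====
theorem get_worker_task_load_spec : Claim_equal_get_worker_task_load := by
  intro events workers _
  unfold Spec_get_worker_task_load get_worker_task_load get_worker_task_load_alt
  have hR : (PySem.List.enumerate workers 1).map (·.1) =
      PySem.List.pyRange 1 ((workers.length : Int) + 1) 1 := by
    simpa [add_comm] using PySem.List.map_fst_enumerate workers 1
  set R := PySem.List.pyRange 1 ((workers.length : Int) + 1) 1 with hRdef
  have hnd : R.Nodup := PySem.List.nodup_pyRange_one 1 _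
  have hfreshe : ∀ (α : Type) (w : Int), w ∈ R →
      (PySem.Dict.empty : PySem.Dict Int α).contains w = false := by
    intro α w _; rfl
  have hA := pv_foldl_insert_fresh R
      (fun w => [(PySem.List.enumerate events 1).foldl (fun acc p =>
          if p.2.2.contains w then acc ++ [p.1] else acc) []])
      PySem.Dict.empty hnd (fun w hw => hfreshe _ w hw)
  rw [show (PySem.Dict.empty : PySem.Dict Int (List (List Int))).items = [] from rfl,
    List.nil_append] at hA
  have h0' := pv_foldl_insert_fresh R (fun _ => ([] : List Int)) PySem.Dict.empty hnd
      (fun w hw => hfreshe _ w hw)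
  rw [show (PySem.Dict.empty : PySem.Dict Int (List Int)).items = [] from rfl,
    List.nil_append] at h0'
  have h0 : R.foldl (fun d i => d.insert i []) (PySem.Dict.empty : PySem.Dict Int (List Int)) =
      PySem.Dict.mk (R.map (fun w => (w, ([] : List Int)))) := congrArg PySem.Dict.mk h0'
  simp only [hR, hA, h0, pv_scatter_all, List.map_map]
  refine List.map_congr_left (fun w _ => ?_)
  have hfi := PySem.List.foldl_append_if (fun p : Int × Int × List Int => p.2.2.contains w)
      (fun p => p.1) (PySem.List.enumerate events 1) []
  simp only [List.nil_append] at hfi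
  simp only [Function.comp_def, hfi, List.nil_append]
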